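-- pv_equiv track=rewrite | github.com/MrBrantCode/unitest_baseline | mut_generate/mist_train_cf/cf_83498/solution.py | two_smallest_unique_numbers
-- ===== SOURCE A (Python) =====
-- def two_smallest_unique_numbers(numbers):
--     # First sort the list
--     sorted_numbers = sorted(numbers)
--
--     # Find the first two unique numbers
--     results = []
--     i = 0
--     while len(results) < 2 and i < len(sorted_numbers):
--         if sorted_numbers[i] not in results:
--             results.append(sorted_numbers[i])
--         i += 1
--
--     return results
-- ===== SOURCE B (Python) =====
-- def two_smallest_unique_numbers(numbers):
--     # Single pass: track the smallest and second-smallest distinct values.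
--     m1 = None
--     m2 = None
--     for x in numbers:
--         if m1 is None:
--             m1 = x
--         elif x < m1:
--             m2 = m1
--             m1 = x
--         elif x != m1 and (m2 is None or x < m2):
--             m2 = x
--     if m1 is None:
--         return []
--     if m2 is None:
--         return [m1]
--     return [m1, m2]
-- ===== Notes on version B (the rewrite author's own statement) =====
-- stated objective: faster
-- what changed: Replaces A's sort-then-scan-for-two-unique-values with a single pass that tracks the smallest and second-smallest distinct values in two variables.
import Mathlib
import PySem

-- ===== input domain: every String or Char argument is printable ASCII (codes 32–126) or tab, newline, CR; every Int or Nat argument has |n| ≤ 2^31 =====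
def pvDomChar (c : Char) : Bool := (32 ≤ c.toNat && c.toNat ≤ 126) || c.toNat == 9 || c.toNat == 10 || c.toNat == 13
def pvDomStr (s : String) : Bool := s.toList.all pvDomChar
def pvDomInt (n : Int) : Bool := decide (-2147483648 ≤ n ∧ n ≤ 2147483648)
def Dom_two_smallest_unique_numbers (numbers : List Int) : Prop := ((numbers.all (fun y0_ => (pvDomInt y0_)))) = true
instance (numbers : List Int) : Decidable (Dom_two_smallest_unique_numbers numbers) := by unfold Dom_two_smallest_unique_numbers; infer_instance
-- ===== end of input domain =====

-- B replaces A's sort-then-scan by a single pass tracking the two smallest distinct values (objective: faster, O(n) vs O(n log n)).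

-- ===== PORT A =====
-- the while loop: scan the sorted list in order, appending unseen values until two are collected
def pvLoopA (res : List Int) : List Int → List Int
  | [] => res
  | x :: xs =>
    if res.length < 2 then
      pvLoopA (if res.contains x then res else res ++ [x]) xs
    else res

def two_smallest_unique_numbers (numbers : List Int) : List Int :=
  pvLoopA [] (PySem.List.sorted numbers (fun x => x) false)

-- ===== PORT B =====
-- one step of B's for loop over the state (m1, m2)
def pvStepB (s : Option Int × Option Int) (x : Int) : Option Int × Option Int :=
  match s with
  | (none, m2) => (some x, m2)
  | (some a, none) =>
    if x < a then (some x, some a)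
    else if x ≠ a then (some a, some x)
    else (some a, none)
  | (some a, some b) =>
    if x < a then (some x, some a)
    else if x ≠ a ∧ x < b then (some a, some x)
    else (some a, some b)

def two_smallest_unique_numbers_alt (numbers : List Int) : List Int :=
  match numbers.foldl pvStepB (none, none) with
  | (none, _) => []
  | (some a, none) => [a]
  | (some a, some b) => [a, b]

-- ===== PRECONDITION & SPEC =====
def Spec_two_smallest_unique_numbers (numbers : List Int) (out : List Int) : Prop := out = two_smallest_unique_numbers_alt numbers
instance (numbers : List Int) (out : List Int) : Decidable (Spec_two_smallest_unique_numbers numbers out) := by unfold Spec_two_smallest_unique_numbers; infer_instance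

-- ===== CLAIM (what is proved, stated in full; the proofs are below) =====
def Claim_equal_two_smallest_unique_numbers : Prop := ∀ (numbers : List Int), Dom_two_smallest_unique_numbers numbers → Spec_two_smallest_unique_numbers numbers (two_smallest_unique_numbers numbers)

-- ===== LEMMAS AND PROOFS =====

-- order-free characterisation of the state both programs compute:
-- (minimum of xs, minimum of the elements strictly above it)
def pvSM (xs : List Int) : Option Int × Option Int :=
  match xs.min? with
  | none => (none, none)
  | some m => (some m, (xs.filter (fun y => decide (m < y))).min?)

-- render the state as the returned list (the tail of B)
def pvRender (s : Option Int × Option Int) : List Int :=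
  match s with
  | (none, _) => []
  | (some a, none) => [a]
  | (some a, some b) => [a, b]

theorem pvMin?_append_singleton (xs : List Int) (x : Int) :
    (xs ++ [x]).min? = some (xs.min?.elim x (min x)) := by
  induction xs with
  | nil => simp [List.min?_cons]
  | cons y ys ih =>
    simp only [List.cons_append, List.min?_cons, ih] at *
    cases h : ys.min? <;>
      simp [Option.elim, Int.min_def] <;> omega

theorem pvStepB_sm (ys : List Int) (x : Int) :
    pvStepB (pvSM ys) x = pvSM (ys ++ [x]) := by
  cases hm : ys.min? with
  | none =>
    have hnil : ys = [] := List.min?_eq_none_iff.mp hm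
    subst hnil
    simp [pvSM, pvStepB, List.min?_cons]
  | some m =>
    obtain ⟨hmem, hle⟩ := List.min?_eq_some_iff.mp hm
    have happ : (ys ++ [x]).min? = some (min m x) := by
      rw [pvMin?_append_singleton, hm]; simp [Option.elim, min_comm]
    by_cases hlt : x < m
    · -- x becomes the new minimum; all of ys survives the filter, so m is the new second
      have hmin : min m x = x := by omega
      have hfself : ys.filter (fun y => decide (x < y)) = ys :=
        List.filter_eq_self.mpr (fun a ha => by
          have := hle a ha; simp; omega)
      have hL : pvStepB (pvSM ys) x = (some x, some m) := by
        unfold pvSM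
        rw [hm]
        cases h2 : (ys.filter (fun y => decide (m < y))).min? <;> simp [pvStepB, hlt, h2]
      rw [hL]
      unfold pvSM
      rw [happ, hmin]
      simp [List.filter_append, hfself, hm]
    · by_cases heq : x = m
      · -- duplicate of the minimum: state and filter both unchanged
        subst heq
        simp only [pvSM, hm, happ, min_self, List.filter_append,
          List.filter_cons, List.filter_nil, lt_irrefl, decide_false]
        cases h2 : (ys.filter (fun y => decide (x < y))).min? <;>
          simp [pvStepB, List.append_nil, h2]
      · -- m < x: minimum keeps, x joins the candidates for second place
        have hmx : m < x := by omega
        have hmin : min m x = m := by omega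
        have hfapp : (ys ++ [x]).filter (fun y => decide (m < y)) =
            ys.filter (fun y => decide (m < y)) ++ [x] := by
          simp [List.filter_append, hmx]
        simp only [pvSM, hm, happ, hmin, hfapp, pvMin?_append_singleton]
        cases h2 : (ys.filter (fun y => decide (m < y))).min? with
        | none => simp [pvStepB, hlt, heq, Option.elim]
        | some b =>
          by_cases hxb : x < b <;>
            simp [pvStepB, hlt, heq, Option.elim, Int.min_def, hxb] <;> omega

theorem pvFoldB_eq_sm (xs : List Int) :
    xs.foldl pvStepB (none, none) = pvSM xs := by
  induction xs using List.reverseRecOn with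
  | nil => simp [pvSM]
  | append_singleton ys x ih =>
    rw [List.foldl_append, List.foldl_cons, List.foldl_nil, ih, pvStepB_sm]

theorem pvLoopA_full (t : List Int) (a b : Int) : pvLoopA [a, b] t = [a, b] := by
  cases t <;> simp [pvLoopA]

theorem pvMin?_cons_of_le (y : Int) (l : List Int) (h : ∀ z ∈ l, y ≤ z) :
    (y :: l).min? = some y := by
  apply List.min?_eq_some_iff.mpr
  refine ⟨List.mem_cons_self, fun b hb => ?_⟩
  rcases List.mem_cons.mp hb with rfl | hb
  · exact le_refl b
  · exact h b hb

theorem pvLoopA_one (a : Int) (t : List Int) :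
    t.Pairwise (· ≤ ·) → (∀ y ∈ t, a ≤ y) →
    pvLoopA [a] t =
      match (t.filter (fun y => decide (a < y))).min? with
      | none => [a]
      | some b => [a, b] := by
  induction t with
  | nil => intro _ _; simp [pvLoopA]
  | cons y t' ih =>
    intro hp ha
    by_cases hya : y = a
    · subst hya
      have hstep : pvLoopA [y] (y :: t') = pvLoopA [y] t' := by
        simp [pvLoopA]
      rw [hstep, ih (List.Pairwise.of_cons hp) (fun z hz => ha z (List.mem_cons_of_mem _ hz))]
      simp
    · have hay : a < y := lt_of_le_of_ne (ha y (List.mem_cons_self)) (Ne.symm hya)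
      have hstep : pvLoopA [a] (y :: t') = pvLoopA [a, y] t' := by
        simp [pvLoopA, hya]
      rw [hstep, pvLoopA_full]
      have hyle : ∀ z ∈ t'.filter (fun w => decide (a < w)), y ≤ z :=
        fun z hz => (List.pairwise_cons.mp hp).1 z (List.mem_of_mem_filter hz)
      have hfy : ((y :: t').filter (fun w => decide (a < w))).min? = some y := by
        rw [List.filter_cons, if_pos (by simpa using hay)]
        exact pvMin?_cons_of_le y _ hyle
      rw [hfy]

theorem pvLoopA_eq_render (s : List Int) (hp : s.Pairwise (· ≤ ·)) :
    pvLoopA [] s = pvRender (pvSM s) := by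
  cases s with
  | nil => simp [pvLoopA, pvSM, pvRender]
  | cons a t =>
    have ha : ∀ y ∈ t, a ≤ y := (List.pairwise_cons.mp hp).1
    have hmin : (a :: t).min? = some a := pvMin?_cons_of_le a t ha
    have h1 : pvLoopA [] (a :: t) = pvLoopA [a] t := by simp [pvLoopA]
    rw [h1, pvLoopA_one a t (List.Pairwise.of_cons hp) ha]
    simp only [pvSM, hmin, List.filter_cons, lt_irrefl, decide_false]
    cases h2 : (t.filter (fun y => decide (a < y))).min? <;> simp [pvRender, h2]

theorem pvMin?_of_perm {xs ys : List Int} (h : xs.Perm ys) : xs.min? = ys.min? := by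
  cases hy : ys.min? with
  | none =>
    rw [List.min?_eq_none_iff] at hy ⊢
    subst hy
    exact List.perm_nil.mp h
  | some m =>
    obtain ⟨hmem, hle⟩ := List.min?_eq_some_iff.mp hy
    exact List.min?_eq_some_iff.mpr
      ⟨h.mem_iff.mpr hmem, fun b hb => hle b (h.mem_iff.mp hb)⟩

theorem pvSM_of_perm {xs ys : List Int} (h : xs.Perm ys) : pvSM xs = pvSM ys := by
  unfold pvSM
  rw [pvMin?_of_perm h]
  cases ys.min? with
  | none => rfl
  | some m =>
    dsimp only
    rw [pvMin?_of_perm (h.filter (fun y => decide (m < y)))]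

-- ===== VERDICT (by name: the statement is the Claim_ definition above) =====
theorem two_smallest_unique_numbers_spec : Claim_equal_two_smallest_unique_numbers := by
  intro numbers _
  unfold Spec_two_smallest_unique_numbers two_smallest_unique_numbers two_smallest_unique_numbers_alt
  rw [pvFoldB_eq_sm]
  have hperm := PySem.List.sorted_perm numbers (fun x => x) false
  have hp : (PySem.List.sorted numbers (fun x => x) false).Pairwise (· ≤ ·) :=
    PySem.List.sorted_pairwise numbers (fun x => x)
  rw [pvLoopA_eq_render _ hp, pvSM_of_perm hperm]
  rfl
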